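-- pv_equiv track=rewrite | github.com/cubic461/Noodle-Core | noodle-brain/src/core/planner.py | _assess_overall_risk
-- ===== SOURCE A (Python) =====
-- from typing import Any, Optional
--
-- def _assess_overall_risk(tasks: list[dict[str, Any]]) -> str:
--     """Assess overall risk of all tasks."""
--     risks = [task.get("risk", "medium") for task in tasks]
--
--     if "high" in risks:
--         return "high"
--     elif "medium" in risks:
--         return "medium"
--     else:
--         return "low"
-- ===== SOURCE B (Python) =====
-- def _assess_overall_risk(tasks: list[dict[str, object]]) -> str:
--     """Assess overall risk of all tasks (single accumulating pass)."""
--     level = 0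
--     for task in tasks:
--         r = task.get("risk", "medium")
--         if r == "high":
--             level = max(level, 2)
--         elif r == "medium":
--             level = max(level, 1)
--     return ("low", "medium", "high")[level]
-- ===== Notes on version B (the rewrite author's own statement) =====
-- stated objective: alternative
-- what changed: Replaces building a risks list plus two membership scans with one pass keeping a running numeric maximum risk level, translated to a string at the end.
import Mathlib
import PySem

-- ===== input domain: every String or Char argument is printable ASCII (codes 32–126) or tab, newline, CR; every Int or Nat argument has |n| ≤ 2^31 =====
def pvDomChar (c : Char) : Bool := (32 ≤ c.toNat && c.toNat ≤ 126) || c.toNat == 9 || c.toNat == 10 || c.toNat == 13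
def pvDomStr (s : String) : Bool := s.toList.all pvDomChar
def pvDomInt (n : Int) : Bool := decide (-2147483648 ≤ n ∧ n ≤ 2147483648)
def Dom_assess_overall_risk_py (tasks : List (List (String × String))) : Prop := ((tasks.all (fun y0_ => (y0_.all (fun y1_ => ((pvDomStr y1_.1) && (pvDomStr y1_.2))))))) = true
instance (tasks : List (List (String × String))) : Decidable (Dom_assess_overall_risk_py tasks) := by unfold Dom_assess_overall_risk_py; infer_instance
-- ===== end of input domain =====

-- B builds the same result by one accumulating pass with a numeric maximum instead of
-- a list comprehension plus two membership tests; same cost, different decomposition.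

-- ===== PORT A =====
def assess_overall_risk_py (tasks : List (List (String × String))) : String :=
  let risks := tasks.map (fun task => PySem.Dict.getD (PySem.Dict.mk task) "risk" "medium")
  if "high" ∈ risks then "high"
  else if "medium" ∈ risks then "medium"
  else "low"

-- ===== PORT B =====
def pvRiskStep (level : Nat) (task : List (String × String)) : Nat :=
  if PySem.Dict.getD (PySem.Dict.mk task) "risk" "medium" = "high" then max level 2
  else if PySem.Dict.getD (PySem.Dict.mk task) "risk" "medium" = "medium" then max level 1
  else level

def assess_overall_risk_py_alt (tasks : List (List (String × String))) : String :=
  let level := tasks.foldl pvRiskStep 0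
  if level = 0 then "low" else if level = 1 then "medium" else "high"

-- ===== PRECONDITION & SPEC =====
def Spec_assess_overall_risk_py (tasks : List (List (String × String))) (out : String) : Prop := out = assess_overall_risk_py_alt tasks
instance (tasks : List (List (String × String))) (out : String) : Decidable (Spec_assess_overall_risk_py tasks out) := by unfold Spec_assess_overall_risk_py; infer_instance

-- ===== CLAIM (what is proved, stated in full; the proofs are below) =====
def Claim_equal_assess_overall_risk_py : Prop := ∀ (tasks : List (List (String × String))), Dom_assess_overall_risk_py tasks → Spec_assess_overall_risk_py tasks (assess_overall_risk_py tasks)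

-- ===== LEMMAS AND PROOFS =====

def pvRiskOf (tasks : List (List (String × String))) : Nat :=
  let risks := tasks.map (fun task => PySem.Dict.getD (PySem.Dict.mk task) "risk" "medium")
  if "high" ∈ risks then 2 else if "medium" ∈ risks then 1 else 0

theorem pvFold_eq (tasks : List (List (String × String))) (lvl : Nat) :
    tasks.foldl pvRiskStep lvl = max lvl (pvRiskOf tasks) := by
  induction tasks generalizing lvl with
  | nil => simp [pvRiskOf]
  | cons t ts ih =>
    rw [List.foldl_cons, ih]
    have hstep : pvRiskStep lvl t = max lvl (pvRiskStep 0 t) := by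
      unfold pvRiskStep; split_ifs <;> omega
    have hcons : pvRiskOf (t :: ts) = max (pvRiskStep 0 t) (pvRiskOf ts) := by
      by_cases h1 : PySem.Dict.getD (PySem.Dict.mk t) "risk" "medium" = "high"
      · simp [pvRiskOf, pvRiskStep, h1]
        split_ifs <;> omega
      · by_cases h2 : PySem.Dict.getD (PySem.Dict.mk t) "risk" "medium" = "medium"
        · simp [pvRiskOf, pvRiskStep, h2]
          split_ifs <;> omega
        · simp [pvRiskOf, pvRiskStep, h1, h2, Ne.symm h1, Ne.symm h2]
    rw [hstep, hcons, Nat.max_assoc]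

theorem assess_overall_risk_py_spec : Claim_equal_assess_overall_risk_py := by
  intro tasks _
  unfold Spec_assess_overall_risk_py assess_overall_risk_py assess_overall_risk_py_alt
  rw [pvFold_eq]
  simp only [pvRiskOf]
  by_cases h1 : "high" ∈ tasks.map (fun task => PySem.Dict.getD (PySem.Dict.mk task) "risk" "medium") <;>
    by_cases h2 : "medium" ∈ tasks.map (fun task => PySem.Dict.getD (PySem.Dict.mk task) "risk" "medium") <;>
      simp [h1, h2]
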